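-- pv_equiv track=rewrite | github.com/TruthInIllusion/Auto-Upload-to-115open | src/auto_upload_to_115open/config.py | _normalize_cloud_path
-- ===== SOURCE A (Python) =====
-- def _normalize_cloud_path(path: str) -> str:
--     path = path.strip()
--     if not path:
--         return "/"
--     if not path.startswith("/"):
--         path = "/" + path
--     while "//" in path:
--         path = path.replace("//", "/")
--     if len(path) > 1 and path.endswith("/"):
--         path = path.rstrip("/")
--     return path
-- ===== SOURCE B (Python) =====
-- def _normalize_cloud_path(path: str) -> str:
--     parts = [seg for seg in path.strip().split("/") if seg]
--     return "/" + "/".join(parts)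
-- ===== Notes on version B (the rewrite author's own statement) =====
-- stated objective: simpler
-- what changed: B replaces A's leading-slash guard, iterated double-slash replacement fixpoint loop and trailing-slash rstrip by a single tokenize-and-rejoin: split the stripped path on the separator, drop empty segments, and join them behind one leading separator.
import Mathlib
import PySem

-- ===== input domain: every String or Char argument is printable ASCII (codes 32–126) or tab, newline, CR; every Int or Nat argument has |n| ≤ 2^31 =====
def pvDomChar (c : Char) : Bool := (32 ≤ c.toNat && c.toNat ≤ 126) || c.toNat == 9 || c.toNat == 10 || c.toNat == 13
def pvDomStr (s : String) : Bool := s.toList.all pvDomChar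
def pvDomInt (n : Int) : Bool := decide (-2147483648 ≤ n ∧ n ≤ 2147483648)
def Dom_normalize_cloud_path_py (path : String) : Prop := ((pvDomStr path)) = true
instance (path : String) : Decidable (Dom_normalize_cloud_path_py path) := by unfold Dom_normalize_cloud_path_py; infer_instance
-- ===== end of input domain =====

-- B replaces A's repeated `replace("//","/")` loop and trailing-slash rstrip by one
-- split/filter/join pass over the segments (simpler, one pass).

-- ===== PORT A =====
-- the `while "//" in path:` loop, with a fuel bound (the length suffices: each
-- iteration with "//" present strictly shortens the string); mirrors A step for step
def pvCollapseLoopA (fuel : Nat) (p : List Char) : List Char :=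
  match fuel with
  | 0 => p
  | fuel + 1 =>
      if PySem.Chars.isIn ['/', '/'] p then
        pvCollapseLoopA fuel (PySem.Chars.replace p ['/', '/'] ['/'])
      else p

-- Python str.rstrip("/"): drop the trailing '/' characters (exact; PySem has no char-set rstrip)
def pvRstripSlash (p : List Char) : List Char :=
  (p.reverse.dropWhile (fun c => c == '/')).reverse

def pvNormA (p0 : List Char) : List Char :=
  let p := PySem.Chars.strip p0
  if p = [] then ['/']
  else
    let p1 := if PySem.Chars.startswith p ['/'] then p else '/' :: p
    let p2 := pvCollapseLoopA p1.length p1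
    if 1 < PySem.Chars.len p2 ∧ PySem.Chars.endswith p2 ['/'] then pvRstripSlash p2 else p2

def normalize_cloud_path_py (path : String) : String := String.ofList (pvNormA path.toList)

-- ===== PORT B =====
def pvNormB (p0 : List Char) : List Char :=
  let s := PySem.Chars.strip p0
  let parts := (PySem.Chars.splitOn s ['/']).filter (fun seg => seg ≠ [])
  '/' :: PySem.Chars.join ['/'] parts

def normalize_cloud_path_py_alt (path : String) : String := String.ofList (pvNormB path.toList)

-- ===== PRECONDITION & SPEC =====
def Spec_normalize_cloud_path_py (path : String) (out : String) : Prop := out = normalize_cloud_path_py_alt path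
instance (path : String) (out : String) : Decidable (Spec_normalize_cloud_path_py path out) := by unfold Spec_normalize_cloud_path_py; infer_instance

-- ===== CLAIM (what is proved, stated in full; the proofs are below) =====
def Claim_equal_normalize_cloud_path_py : Prop := ∀ (path : String), Dom_normalize_cloud_path_py path → Spec_normalize_cloud_path_py path (normalize_cloud_path_py path)

-- ===== LEMMAS AND PROOFS =====

-- one pass of Python's s.replace("//", "/")
def pvRep1 : List Char → List Char
  | [] => []
  | [c] => [c]
  | a :: b :: t => if a = '/' ∧ b = '/' then '/' :: pvRep1 t else a :: pvRep1 (b :: t)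

-- full collapse of adjacent duplicate slashes (the loop's fixpoint)
def pvCollapse : List Char → List Char
  | [] => []
  | [c] => [c]
  | a :: b :: t => if a = '/' ∧ b = '/' then pvCollapse (b :: t) else a :: pvCollapse (b :: t)

-- s.split("/") (sep a single char)
def pvSplit : List Char → List (List Char)
  | [] => [[]]
  | c :: t => if c = '/' then [] :: pvSplit t else (pvSplit t).modifyHead (c :: ·)

-- "/".join on the filtered segments
def pvJoinF : List (List Char) → List Char
  | [] => []
  | [x] => x
  | x :: y :: t => x ++ '/' :: pvJoinF (y :: t)

def pvG (s : List Char) : List Char := pvJoinF ((pvSplit s).filter (fun seg => seg ≠ []))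

theorem pvSplit_ne_nil (s : List Char) : pvSplit s ≠ [] := by
  induction s with
  | nil => simp [pvSplit]
  | cons c t ih =>
      simp only [pvSplit]
      split
      · simp
      · cases h : pvSplit t with
        | nil => exact absurd h ih
        | cons a l => simp [List.modifyHead]

theorem pvReplaceGo_eq (fuel : Nat) (l acc : List Char) (h : l.length ≤ fuel) :
    PySem.Chars.replace.go ['/', '/'] ['/'] fuel l acc = acc.reverse ++ pvRep1 l := by
  induction fuel generalizing l acc with
  | zero =>
      have hl : l = [] := by cases l <;> simp_all
      subst hl; simp [PySem.Chars.replace.go, pvRep1]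
  | succ fuel ih =>
      match l, h with
      | [], _ => simp [PySem.Chars.replace.go, pvRep1]
      | [c], _ =>
          rw [PySem.Chars.replace.go]
          have hp : ['/', '/'].isPrefixOf [c] = false := by
            simp [List.isPrefixOf]
          rw [hp]
          simp only [Bool.false_eq_true, if_false]
          rw [ih [] (c :: acc) (by simp)]
          simp [pvRep1]
      | a :: b :: t, h =>
          rw [PySem.Chars.replace.go]
          have ht : t.length ≤ fuel := by simp at h; omega
          have htb : (b :: t).length ≤ fuel := by simp at h ⊢; omega
          by_cases hab : a = '/' ∧ b = '/'
          · obtain ⟨ha, hb⟩ := hab; subst ha; subst hb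
            have hp : ['/', '/'].isPrefixOf ('/' :: '/' :: t) = true := by
              simp [List.isPrefixOf]
            rw [hp]
            simp only [if_true]
            rw [show List.drop ['/', '/'].length ('/' :: '/' :: t) = t from rfl]
            rw [ih t _ ht]
            simp [pvRep1]
          · have hp : ['/', '/'].isPrefixOf (a :: b :: t) = false := by
              rcases (not_and_or.mp hab) with h' | h' <;> simp [List.isPrefixOf] <;> tauto
            rw [hp]
            simp only [Bool.false_eq_true, if_false]
            rw [ih (b :: t) (a :: acc) htb]
            simp [pvRep1, hab]

theorem pvReplace_eq (l : List Char) :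
    PySem.Chars.replace l ['/', '/'] ['/'] = pvRep1 l := by
  rw [PySem.Chars.replace]
  simp only [List.isEmpty_cons, Bool.false_eq_true, if_false]
  rw [pvReplaceGo_eq l.length l [] le_rfl]
  simp

theorem pvSplitGo_eq (fuel : Nat) (l cur : List Char) (acc : List (List Char)) (h : l.length ≤ fuel) :
    PySem.Chars.splitOn.go ['/'] fuel l cur acc
      = acc.reverse ++ (pvSplit l).modifyHead (cur.reverse ++ ·) := by
  induction fuel generalizing l cur acc with
  | zero =>
      have hl : l = [] := by cases l <;> simp_all
      subst hl
      simp [PySem.Chars.splitOn.go, pvSplit, List.modifyHead]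
  | succ fuel ih =>
      match l, h with
      | [], _ => simp [PySem.Chars.splitOn.go, pvSplit, List.modifyHead]
      | c :: t, h =>
          rw [PySem.Chars.splitOn.go]
          have ht : t.length ≤ fuel := by simp at h; omega
          by_cases hc : c = '/'
          · subst hc
            have hp : ['/'].isPrefixOf ('/' :: t) = true := by simp [List.isPrefixOf]
            rw [hp]
            simp only [if_true]
            rw [show List.drop ['/'].length ('/' :: t) = t from rfl]
            rw [ih t [] _ ht]
            simp only [pvSplit, if_true, List.reverse_cons, List.reverse_nil, List.nil_append,
              List.modifyHead, List.append_assoc, List.singleton_append]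
            cases pvSplit t <;> simp
          · have hp : ['/'].isPrefixOf (c :: t) = false := by
              simp [List.isPrefixOf]; exact fun h' => hc h'.symm
            rw [hp]
            simp only [Bool.false_eq_true, if_false]
            rw [ih t (c :: cur) acc ht]
            simp only [pvSplit, hc, if_false]
            cases hs : pvSplit t with
            | nil => exact absurd hs (pvSplit_ne_nil t)
            | cons x xs => simp [List.modifyHead]

theorem pvSplitOn_eq (l : List Char) : PySem.Chars.splitOn l ['/'] = pvSplit l := by
  rw [PySem.Chars.splitOn]
  rw [pvSplitGo_eq (l.length + 1) l [] [] (by omega)]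
  cases hs : pvSplit l with
  | nil => exact absurd hs (pvSplit_ne_nil l)
  | cons x xs => simp [List.modifyHead]

theorem pvRep1_head? (l : List Char) : (pvRep1 l).head? = l.head? := by
  match l with
  | [] => rfl
  | [c] => rfl
  | a :: b :: t =>
      simp only [pvRep1]
      by_cases hab : a = '/' ∧ b = '/'
      · simp [hab]
      · simp [hab]

theorem pvCollapse_cons (c : Char) (l : List Char) :
    pvCollapse (c :: l) =
      if c = '/' ∧ l.head? = some '/' then pvCollapse l else c :: pvCollapse l := by
  match l with
  | [] => simp [pvCollapse]
  | b :: t =>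
      simp only [pvCollapse, List.head?_cons]
      by_cases h : c = '/' ∧ b = '/'
      · simp [h]
      · simp [h]

theorem pvCollapse_rep1 (l : List Char) : pvCollapse (pvRep1 l) = pvCollapse l := by
  induction l using pvRep1.induct with
  | case1 => rfl
  | case2 c => rfl
  | case3 a b t hab ih =>
      obtain ⟨ha, hb⟩ := hab; subst ha; subst hb
      simp only [pvRep1, pvCollapse, and_self, if_true]
      rw [pvCollapse_cons '/' (pvRep1 t), pvRep1_head?]
      rw [pvCollapse_cons '/' t]
      by_cases h : ('/' : Char) = '/' ∧ t.head? = some '/'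
      · simp [h, ih]
      · simp [ih]
  | case4 a b t hab ih =>
      simp only [pvRep1, pvCollapse, hab, if_false]
      rw [pvCollapse_cons a (pvRep1 (b :: t)), pvRep1_head?]
      rw [if_neg (fun h' : a = '/' ∧ (b :: t).head? = some '/' =>
        hab ⟨h'.1, by simpa using h'.2⟩)]
      rw [ih]

theorem pvRep1_length_le (l : List Char) : (pvRep1 l).length ≤ l.length := by
  induction l using pvRep1.induct with
  | case1 => simp [pvRep1]
  | case2 c => simp [pvRep1]
  | case3 a b t hab ih =>
      obtain ⟨ha, hb⟩ := hab; subst ha; subst hb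
      simp only [pvRep1, and_self, if_true, List.length_cons]; omega
  | case4 a b t hab ih => simp only [pvRep1, hab, if_false, List.length_cons] at ih ⊢; omega

theorem pvRep1_length_lt (l : List Char) (h : ['/', '/'] <:+: l) :
    (pvRep1 l).length < l.length := by
  induction l using pvRep1.induct with
  | case1 => simp at h
  | case2 c =>
      exfalso
      rcases h with ⟨p, q, hpq⟩
      apply_fun List.length at hpq
      simp at hpq; omega
  | case3 a b t hab ih =>
      have := pvRep1_length_le t
      obtain ⟨ha, hb⟩ := hab; subst ha; subst hb
      simp only [pvRep1, and_self, if_true, List.length_cons]; omega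
  | case4 a b t hab ih =>
      have h' : ['/', '/'] <:+: (b :: t) := by
        rcases (List.infix_cons_iff.mp h) with h' | h'
        · exfalso
          rcases h' with ⟨q, hq⟩
          apply hab
          cases hq
          exact ⟨rfl, rfl⟩
        · exact h'
      have := ih h'
      simp only [pvRep1, hab, if_false, List.length_cons] at this ⊢; omega

theorem pvCollapse_of_no_double (l : List Char) (h : ¬ (['/', '/'] <:+: l)) :
    pvCollapse l = l := by
  induction l using pvCollapse.induct with
  | case1 => rfl
  | case2 c => rfl
  | case3 a b t hab ih =>
      exfalso
      obtain ⟨ha, hb⟩ := hab; subst ha; subst hb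
      exact h (List.infix_cons_iff.mpr (Or.inl ⟨t, rfl⟩))
  | case4 a b t hab ih =>
      simp only [pvCollapse, hab, if_false]
      rw [ih (fun h' => h (List.infix_cons_iff.mpr (Or.inr h')))]

theorem pvLoop_eq (fuel : Nat) (l : List Char) (h : l.length ≤ fuel) :
    pvCollapseLoopA fuel l = pvCollapse l := by
  induction fuel generalizing l with
  | zero =>
      have hl : l = [] := by cases l <;> simp_all
      subst hl; rfl
  | succ fuel ih =>
      simp only [pvCollapseLoopA]
      by_cases hin : PySem.Chars.isIn ['/', '/'] l = true
      · rw [if_pos hin, pvReplace_eq]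
        have hinf : ['/', '/'] <:+: l := (PySem.Chars.isIn_iff_infix _ _).mp hin
        have hlt := pvRep1_length_lt l hinf
        rw [ih (pvRep1 l) (by omega)]
        exact pvCollapse_rep1 l
      · rw [if_neg hin]
        have hfalse : PySem.Chars.isIn ['/', '/'] l = false := by simpa using hin
        exact (pvCollapse_of_no_double l ((PySem.Chars.isIn_eq_false_iff _ _).mp hfalse)).symm

-- segments of pvSplit contain no slash
theorem pvSplit_no_slash (s : List Char) : ∀ seg ∈ pvSplit s, '/' ∉ seg := by
  induction s with
  | nil => intro seg hm; simp [pvSplit] at hm; simp [hm]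
  | cons c t ih =>
      intro seg hm
      by_cases hc : c = '/'
      · subst hc
        simp only [pvSplit, if_true, List.mem_cons] at hm
        rcases hm with hm | hm
        · simp [hm]
        · exact ih seg hm
      · simp only [pvSplit, hc, if_false] at hm
        cases hs : pvSplit t with
        | nil => exact absurd hs (pvSplit_ne_nil t)
        | cons x xs =>
            rw [hs] at hm
            simp only [List.modifyHead, List.mem_cons] at hm
            rcases hm with hm | hm
            · subst hm
              intro hmem
              rcases List.mem_cons.mp hmem with h' | h'
              · exact hc h'.symm
              · exact ih x (hs ▸ List.mem_cons_self) h'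
            · exact ih seg (hs ▸ List.mem_cons_of_mem x hm)

theorem pvJoinF_ne_nil (x : List Char) (F : List (List Char)) (hx : x ≠ []) :
    pvJoinF (x :: F) ≠ [] := by
  cases F with
  | nil => simpa [pvJoinF] using hx
  | cons y ys =>
      simp only [pvJoinF]
      cases x with
      | nil => exact absurd rfl hx
      | cons a l => simp

theorem pvJoinF_cons_head (c : Char) (y : List Char) (F : List (List Char)) :
    pvJoinF ((c :: y) :: F) = c :: pvJoinF (y :: F) := by
  cases F <;> simp [pvJoinF]

theorem pvG_cons_slash (t : List Char) : pvG ('/' :: t) = pvG t := by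
  simp [pvG, pvSplit]

theorem pvG_cons_of_head_ne (c b : Char) (t : List Char) (hc : c ≠ '/') (hb : b ≠ '/') :
    pvG (c :: b :: t) = c :: pvG (b :: t) := by
  unfold pvG
  simp only [pvSplit, hc, hb, if_false]
  cases hs : pvSplit t with
  | nil => exact absurd hs (pvSplit_ne_nil t)
  | cons x xs =>
      simp only [List.modifyHead, List.filter_cons]
      simp only [ne_eq, List.cons_ne_nil, not_false_eq_true, decide_true, if_true]
      exact pvJoinF_cons_head c (b :: x) (xs.filter (fun seg => decide (seg ≠ [])))

theorem pvG_cons_slash_head (c : Char) (t : List Char) (hc : c ≠ '/') :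
    pvG (c :: '/' :: t) = c :: (if pvG t = [] then [] else '/' :: pvG t) := by
  unfold pvG
  simp only [pvSplit, hc, if_false, if_true]
  rw [show List.modifyHead (fun x => c :: x) ([] :: pvSplit t) = [c] :: pvSplit t from rfl]
  rw [List.filter_cons]
  simp only [ne_eq, List.cons_ne_nil, not_false_eq_true, decide_true, if_true]
  cases hF : List.filter (fun seg => decide ¬seg = []) (pvSplit t) with
  | nil => simp [pvJoinF]
  | cons y ys =>
      have hy : y ≠ [] := by
        have := List.mem_filter.mp (hF ▸ List.mem_cons_self)
        simpa using this.2
      have hne : pvJoinF (y :: ys) ≠ [] := pvJoinF_ne_nil y ys hy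
      simp [pvJoinF, hne]

theorem pvG_empty_all_slash (s : List Char) (h : pvG s = []) : ∀ c ∈ s, c = '/' := by
  induction s with
  | nil => simp
  | cons c t ih =>
      by_cases hc : c = '/'
      · subst hc
        intro d hd
        rcases List.mem_cons.mp hd with h' | h'
        · exact h'
        · refine ih ?_ d h'
          simpa [pvG, pvSplit] using h
      · exfalso
        unfold pvG at h
        simp only [pvSplit, hc, if_false] at h
        cases hs : pvSplit t with
        | nil => exact absurd hs (pvSplit_ne_nil t)
        | cons x xs =>
            rw [hs] at h
            simp only [List.modifyHead, List.filter_cons] at h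
            simp only [ne_eq, List.cons_ne_nil, not_false_eq_true, decide_true, if_true] at h
            exact pvJoinF_ne_nil (c :: x) _ (List.cons_ne_nil c x) h

theorem pvG_ne_nil_of_head (b : Char) (t : List Char) (hb : b ≠ '/') :
    pvG (b :: t) ≠ [] := by
  intro h
  exact hb (pvG_empty_all_slash (b :: t) h b List.mem_cons_self)

theorem pvJoinF_getLast? (F : List (List Char))
    (hF : ∀ x ∈ F, x ≠ [] ∧ '/' ∉ x) :
    ∀ c, (pvJoinF F).getLast? = some c → c ≠ '/' := by
  induction F using pvJoinF.induct with
  | case1 => intro c hc; simp [pvJoinF] at hc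
  | case2 x =>
      intro c hc
      simp only [pvJoinF] at hc
      intro hslash
      subst hslash
      exact (hF x List.mem_cons_self).2 (List.getLast?_eq_some_iff.mp hc |>.elim
        (fun ys hys => hys ▸ List.mem_append_right ys List.mem_cons_self))
  | case3 x y t ih =>
      intro c hc
      have hy : y ≠ [] := (hF y (List.mem_cons_of_mem x List.mem_cons_self)).1
      have hne : pvJoinF (y :: t) ≠ [] := pvJoinF_ne_nil y t hy
      simp only [pvJoinF] at hc
      rw [List.getLast?_append] at hc
      rw [show ('/' :: pvJoinF (y :: t)).getLast? = (pvJoinF (y :: t)).getLast? by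
        cases h : pvJoinF (y :: t) with
        | nil => exact absurd h hne
        | cons a l => simp [List.getLast?_cons_cons]] at hc
      rw [show ((pvJoinF (y :: t)).getLast?.or x.getLast?) = (pvJoinF (y :: t)).getLast? by
        cases h : (pvJoinF (y :: t)).getLast? with
        | none => exact absurd (List.getLast?_eq_none_iff.mp h) hne
        | some a => rfl] at hc
      exact ih (fun z hz => hF z (List.mem_cons_of_mem x hz)) c hc

theorem pvG_getLast? (s : List Char) : ∀ c, (pvG s).getLast? = some c → c ≠ '/' := by
  apply pvJoinF_getLast?
  intro x hx
  have hm := List.mem_filter.mp hx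
  exact ⟨by simpa using hm.2, pvSplit_no_slash s x hm.1⟩

def pvLead (s : List Char) : List Char := if s.head? = some '/' then ['/'] else []
def pvTrail (s : List Char) : List Char :=
  if pvG s ≠ [] ∧ s.getLast? = some '/' then ['/'] else []

theorem pvCollapse_closed (s : List Char) :
    pvCollapse s = pvLead s ++ pvG s ++ pvTrail s := by
  induction s using pvCollapse.induct with
  | case1 => decide
  | case2 c =>
      by_cases hc : c = '/'
      · subst hc; decide
      · simp [pvCollapse, pvLead, pvG, pvSplit, pvJoinF, pvTrail, hc]
  | case3 a b t hab ih =>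
      obtain ⟨ha, hb⟩ := hab; subst ha; subst hb
      simp only [pvCollapse, and_self, if_true]
      rw [ih]
      have hG : pvG ('/' :: '/' :: t) = pvG ('/' :: t) := pvG_cons_slash ('/' :: t)
      have hL : pvLead ('/' :: '/' :: t) = pvLead ('/' :: t) := by simp [pvLead]
      have hT : pvTrail ('/' :: '/' :: t) = pvTrail ('/' :: t) := by
        simp [pvTrail, hG, List.getLast?_cons_cons]
      rw [hG, hL, hT]
  | case4 a b t hab ih =>
      simp only [pvCollapse, hab, if_false]
      rw [ih]
      by_cases ha : a = '/'
      · subst ha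
        have hb : b ≠ '/' := fun hb => hab ⟨rfl, hb⟩
        have hG : pvG ('/' :: b :: t) = pvG (b :: t) := pvG_cons_slash (b :: t)
        have hT : pvTrail ('/' :: b :: t) = pvTrail (b :: t) := by
          simp [pvTrail, hG, List.getLast?_cons_cons]
        rw [hG, hT]
        simp [pvLead, hb]
      · by_cases hb : b = '/'
        · subst hb
          have hG := pvG_cons_slash_head a t ha
          have hGt : pvG ('/' :: t) = pvG t := pvG_cons_slash t
          by_cases hg : pvG t = []
          · -- t is all slashes (or empty); the collapsed tail is a single '/'
            have htr : pvTrail ('/' :: t) = [] := by simp [pvTrail, hGt, hg]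
            have hlast : ('/' :: t).getLast? = some '/' := by
              cases ht : t.getLast? with
              | none =>
                  have : t = [] := List.getLast?_eq_none_iff.mp ht
                  subst this; rfl
              | some d =>
                  have hd : d = '/' :=
                    pvG_empty_all_slash t hg d (List.getLast?_eq_some_iff.mp ht |>.elim
                      (fun ys hys => hys ▸ List.mem_append_right ys List.mem_cons_self))
                  subst hd
                  cases t with
                  | nil => simp at ht
                  | cons x l => rw [List.getLast?_cons_cons, ht]
            have htr2 : pvTrail (a :: '/' :: t) = ['/'] := by
              have : pvG (a :: '/' :: t) ≠ [] := pvG_ne_nil_of_head a ('/' :: t) ha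
              simp [pvTrail, this, List.getLast?_cons_cons, hlast]
            rw [hG, htr2, htr]
            simp [pvLead, hGt, hg, ha]
          · have htr : pvTrail (a :: '/' :: t) = pvTrail ('/' :: t) := by
              have h1 : pvG (a :: '/' :: t) ≠ [] := pvG_ne_nil_of_head a ('/' :: t) ha
              have h2 : pvG ('/' :: t) ≠ [] := by rw [hGt]; exact hg
              simp [pvTrail, h1, h2, List.getLast?_cons_cons]
            rw [hG, htr]
            simp [pvLead, ha, hGt, hg]
        · have hG : pvG (a :: b :: t) = a :: pvG (b :: t) := pvG_cons_of_head_ne a b t ha hb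
          have hgbt : pvG (b :: t) ≠ [] := pvG_ne_nil_of_head b t hb
          have hT : pvTrail (a :: b :: t) = pvTrail (b :: t) := by
            have h1 : pvG (a :: b :: t) ≠ [] := by rw [hG]; simp
            simp [pvTrail, h1, hgbt, List.getLast?_cons_cons]
          rw [hG, hT]
          simp [pvLead, ha, hb]

theorem pvJoinF_eq_intercalate (F : List (List Char)) :
    List.intercalate ['/'] F = pvJoinF F := by
  induction F using pvJoinF.induct with
  | case1 => simp [pvJoinF, List.intercalate, List.intersperse]
  | case2 x => simp [pvJoinF, List.intercalate, List.intersperse]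
  | case3 x y t ih =>
      simp only [List.intercalate, List.intersperse] at ih ⊢
      simp [pvJoinF, ih]

theorem pvEndswith_getLast? (u : List Char) :
    PySem.Chars.endswith u ['/'] = true ↔ u.getLast? = some '/' := by
  rw [PySem.Chars.endswith_iff]
  constructor
  · rintro ⟨w, rfl⟩
    rw [List.getLast?_append]; rfl
  · intro h
    rcases List.getLast?_eq_some_iff.mp h with ⟨ys, rfl⟩
    exact ⟨ys, rfl⟩

theorem pvRstripSlash_single (g : List Char) (c : Char) (hc : g.getLast? = some c)
    (hne : c ≠ '/') : pvRstripSlash ('/' :: (g ++ ['/'])) = '/' :: g := by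
  unfold pvRstripSlash
  have hrev : ('/' :: (g ++ ['/'])).reverse = '/' :: (g.reverse ++ ['/']) := by
    simp
  rw [hrev]
  rw [List.dropWhile_cons]
  simp only [beq_self_eq_true, if_true]
  have hgrev : g.reverse.head? = some c := by rw [List.head?_reverse, hc]
  cases hg : g.reverse with
  | nil => rw [hg] at hgrev; simp at hgrev
  | cons d l =>
      rw [hg] at hgrev
      have hd : d = c := by injection hgrev
      subst hd
      rw [show (d :: l) ++ ['/'] = d :: (l ++ ['/']) from rfl]
      rw [List.dropWhile_cons]
      simp only [beq_iff_eq, hne, if_false]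
      rw [show (d :: (l ++ ['/'])).reverse = ('/' :: (d :: l).reverse) from by simp]
      rw [← hg]
      simp

theorem pvNorm_eq (p : List Char) : pvNormA p = pvNormB p := by
  simp only [pvNormA, pvNormB]
  rw [pvSplitOn_eq]
  rw [show PySem.Chars.join ['/'] ((pvSplit (PySem.Chars.strip p)).filter (fun seg => seg ≠ []))
      = pvG (PySem.Chars.strip p) from pvJoinF_eq_intercalate _]
  generalize PySem.Chars.strip p = s
  by_cases hnil : s = []
  · subst hnil
    simp only [if_true]
    decide
  · rw [if_neg hnil]
    -- the collapsed string is '/' :: (pvG s ++ pvTrail s)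
    have hp2 : ∀ p1 : List Char,
        p1 = (if PySem.Chars.startswith s ['/'] then s else '/' :: s) →
        pvCollapseLoopA p1.length p1 = '/' :: (pvG s ++ pvTrail s) := by
      intro p1 hp1
      rw [pvLoop_eq p1.length p1 le_rfl]
      by_cases hsw : PySem.Chars.startswith s ['/'] = true
      · rw [if_pos hsw] at hp1
        subst hp1
        rcases (PySem.Chars.startswith_iff _ _).mp hsw with ⟨t, rfl⟩
        rw [pvCollapse_closed]
        simp [pvLead]
      · rw [if_neg hsw] at hp1
        subst hp1
        rw [pvCollapse_closed]
        have hG : pvG ('/' :: s) = pvG s := pvG_cons_slash s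
        have hT : pvTrail ('/' :: s) = pvTrail s := by
          cases s with
          | nil => exact absurd rfl hnil
          | cons x l => simp [pvTrail, hG, List.getLast?_cons_cons]
        rw [hG, hT]
        simp [pvLead]
    rw [hp2 _ rfl]
    by_cases hg : pvG s = []
    · -- collapsed result is just "/": the length test fails
      have hT : pvTrail s = [] := by simp [pvTrail, hg]
      rw [hg, hT]
      simp [PySem.Chars.len]
    · obtain ⟨c, hc⟩ : ∃ c, (pvG s).getLast? = some c := by
        cases h : (pvG s).getLast? with
        | none => exact absurd (List.getLast?_eq_none_iff.mp h) hg
        | some c => exact ⟨c, rfl⟩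
      have hcne : c ≠ '/' := pvG_getLast? s c hc
      by_cases hl : s.getLast? = some '/'
      · have hT : pvTrail s = ['/'] := by simp [pvTrail, hg, hl]
        rw [hT]
        have hlen : 1 < PySem.Chars.len ('/' :: (pvG s ++ ['/'])) := by
          simp [PySem.Chars.len]
        have hend : PySem.Chars.endswith ('/' :: (pvG s ++ ['/'])) ['/'] = true := by
          rw [pvEndswith_getLast?]
          rw [show ('/' :: (pvG s ++ ['/'])) = ('/' :: pvG s) ++ ['/'] from by simp]
          rw [List.getLast?_append]; rfl
        rw [if_pos ⟨hlen, hend⟩]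
        exact pvRstripSlash_single (pvG s) c hc hcne
      · have hT : pvTrail s = [] := by simp [pvTrail, hl]
        rw [hT]
        have hend : ¬ (PySem.Chars.endswith ('/' :: (pvG s ++ [])) ['/'] = true) := by
          rw [pvEndswith_getLast?]
          simp only [List.append_nil]
          intro h
          rw [show ('/' :: pvG s).getLast? = (pvG s).getLast? from by
            cases hgg : pvG s with
            | nil => exact absurd hgg hg
            | cons x l => exact List.getLast?_cons_cons] at h
          rw [hc] at h
          exact hcne (by injection h)
        rw [if_neg (fun hco => hend hco.2)]
        simp

-- ===== VERDICT (by name: the statement is the Claim_ definition above) =====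
theorem normalize_cloud_path_py_spec : Claim_equal_normalize_cloud_path_py := by
  intro path _
  show _ = _
  unfold normalize_cloud_path_py normalize_cloud_path_py_alt
  rw [pvNorm_eq]
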